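-- pv_equiv track=rewrite | github.com/WatzTheEngineer/DossierStarPourFilleulInfo | docs/SAE102/S102_DEL_PIN_G1A/programme/allumette/jco/jcoAllumette.py | ordiDifficile
-- ===== SOURCE A (Python) =====
-- def ordiDifficile(nb_allumette) -> int:
--     """Choisit combien d'allumettes seront retirées par le bot niveau difficile
--
--     Args:
--         nb_allumette: Nombnre d'allumettes restantes
--
--     Returns:
--         Entier choisi par le bot
--     """
--     if nb_allumette == 20:
--         return 3
--     elif 1 < nb_allumette <= 4:
--         return nb_allumette - 1
--     else:
--         for i in range(1, 4):
--             if ((nb_allumette - i) % 4) == 1: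
--                 return i
--         return 1
-- ===== SOURCE B (Python) =====
-- def ordiDifficile(nb_allumette) -> int:
--     """Closed form: leave the opponent on a position congruent to 1 mod 4."""
--     r = (nb_allumette - 1) % 4
--     return r if r else 1
-- ===== Notes on version B (the rewrite author's own statement) =====
-- stated objective: simpler
-- what changed: Replaced the three-way branch (special cases for 20 and for 2..4) plus the range(1,4) search loop with one closed form r=(nb_allumette-1)%4, returning r when nonzero and 1 otherwise.
import Mathlib
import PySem

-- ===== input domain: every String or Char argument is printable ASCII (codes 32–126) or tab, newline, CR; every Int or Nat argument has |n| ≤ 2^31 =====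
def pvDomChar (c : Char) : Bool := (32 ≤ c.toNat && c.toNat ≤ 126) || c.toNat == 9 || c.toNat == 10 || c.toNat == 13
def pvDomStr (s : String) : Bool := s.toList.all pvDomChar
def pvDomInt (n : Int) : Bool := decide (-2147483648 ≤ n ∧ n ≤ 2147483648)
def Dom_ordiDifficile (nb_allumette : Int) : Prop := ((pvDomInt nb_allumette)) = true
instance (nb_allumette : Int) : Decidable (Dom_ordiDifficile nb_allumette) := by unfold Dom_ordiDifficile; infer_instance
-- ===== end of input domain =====

-- B replaces A's three-way branch plus range(1,4) search loop with the closed form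
-- r = (nb-1) % 4, returning r when nonzero and 1 otherwise (objective: simpler).

-- ===== PORT A =====
-- the `for i in range(1,4): if ((nb-i)%4)==1: return i` loop, then `return 1`
def ordiDifficileLoop (nb_allumette : Int) : List Int → Int
  | [] => 1
  | i :: rest =>
      if PySem.Int.mod (nb_allumette - i) 4 = 1 then i
      else ordiDifficileLoop nb_allumette rest

def ordiDifficile (nb_allumette : Int) : Int :=
  if nb_allumette = 20 then 3
  else if 1 < nb_allumette ∧ nb_allumette ≤ 4 then nb_allumette - 1
  else ordiDifficileLoop nb_allumette (PySem.List.pyRange 1 4 1)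

-- ===== PORT B =====
def ordiDifficile_alt (nb_allumette : Int) : Int :=
  let r := PySem.Int.mod (nb_allumette - 1) 4
  if r ≠ 0 then r else 1

-- ===== PRECONDITION & SPEC =====
def Spec_ordiDifficile (nb_allumette : Int) (out : Int) : Prop := out = ordiDifficile_alt nb_allumette
instance (nb_allumette : Int) (out : Int) : Decidable (Spec_ordiDifficile nb_allumette out) := by unfold Spec_ordiDifficile; infer_instance

-- ===== CLAIM (what is proved, stated in full; the proofs are below) =====
def Claim_equal_ordiDifficile : Prop := ∀ (nb_allumette : Int), Dom_ordiDifficile nb_allumette → Spec_ordiDifficile nb_allumette (ordiDifficile nb_allumette)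

-- ===== LEMMAS AND PROOFS =====
theorem pyRange_1_4 : PySem.List.pyRange 1 4 1 = [1, 2, 3] := by decide

-- ===== VERDICT (by name: the statement is the Claim_ definition above) =====
theorem ordiDifficile_spec : Claim_equal_ordiDifficile := by
  intro nb _
  unfold Spec_ordiDifficile ordiDifficile ordiDifficile_alt
  rw [pyRange_1_4]
  have hm : ∀ a : Int, PySem.Int.mod a 4 = a % 4 := fun a =>
    PySem.Int.mod_eq_emod_of_pos (by norm_num)
  simp only [ordiDifficileLoop, hm]
  split_ifs <;> omega
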